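-- pv_equiv track=rewrite | github.com/Wiktor-Potapczyk/agent-governance-framework | hooks/dispatch-compliance-check.py | extract_dispatch_names
-- ===== SOURCE A (Python) =====
-- KNOWN_DISPATCH_NAMES = {
--     # Agents
--     "adversarial-reviewer", "api-designer", "api-security-audit", "architect-review", "architect-reviewer",
--     "blueprint-mode", "competitive-analyst", "content-marketer", "data-engineer",
--     "debugger", "git-flow-manager", "implementation-plan", "llm-architect",
--     "mcp-developer", "mcp-registry-navigator", "mcp-server-architect", "n8n-reviewer",
--     "nosql-specialist", "pm-orchestrator", "postgres-pro", "powershell-7-expert",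
--     "prompt-engineer", "query-clarifier", "report-generator", "research-analyst",
--     "research-coordinator", "research-orchestrator", "research-synthesizer",
--     "technical-researcher", "vault-keeper", "workflow-orchestrator",
--     # Skills
--     "process-qa", "process-analysis", "process-build", "process-planning",
--     "process-research", "process-pentest", "pm", "task-classifier", "verify",
--     "ensemble", "architect-loop", "save", "maintain", "index",
-- }
--
-- def extract_dispatch_names(raw_text):
--     """Extract only known agent/skill names from MUST DISPATCH raw text.
--     Filters trailing reasoning text (P0 fix 2026-04-09)."""
--     if not raw_text:
--         return []
--     raw_lower = raw_text.lower().strip()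
--     if raw_lower.startswith("none") or raw_lower.startswith("n/a"):
--         return []
--
--     found = []
--     for segment in raw_text.split(","):
--         segment = segment.strip()
--         words = segment.split()
--         for i in range(min(3, len(words)), 0, -1):
--             candidate = " ".join(words[:i]).strip().lower().rstrip(".,;:")
--             if candidate in KNOWN_DISPATCH_NAMES:
--                 found.append(candidate)
--                 break
--     return found
-- ===== SOURCE B (Python) =====
-- KNOWN_DISPATCH_NAMES = {
--     # Agents
--     "adversarial-reviewer", "api-designer", "api-security-audit", "architect-review", "architect-reviewer",
--     "blueprint-mode", "competitive-analyst", "content-marketer", "data-engineer",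
--     "debugger", "git-flow-manager", "implementation-plan", "llm-architect",
--     "mcp-developer", "mcp-registry-navigator", "mcp-server-architect", "n8n-reviewer",
--     "nosql-specialist", "pm-orchestrator", "postgres-pro", "powershell-7-expert",
--     "prompt-engineer", "query-clarifier", "report-generator", "research-analyst",
--     "research-coordinator", "research-orchestrator", "research-synthesizer",
--     "technical-researcher", "vault-keeper", "workflow-orchestrator",
--     # Skills
--     "process-qa", "process-analysis", "process-build", "process-planning",
--     "process-research", "process-pentest", "pm", "task-classifier", "verify",
--     "ensemble", "architect-loop", "save", "maintain", "index",
-- }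
--
-- def extract_dispatch_names(raw_text):
--     """Single flat pass: no known name contains a space, so only the first
--     whitespace token of each comma segment can ever match."""
--     if not raw_text:
--         return []
--     raw_lower = raw_text.lower().strip()
--     if raw_lower.startswith("none") or raw_lower.startswith("n/a"):
--         return []
--
--     found = []
--     for segment in raw_text.split(","):
--         words = segment.split()
--         if not words:
--             continue
--         candidate = words[0].lower().rstrip(".,;:")
--         if candidate in KNOWN_DISPATCH_NAMES:
--             found.append(candidate)
--     return found
-- ===== Notes on version B (the rewrite author's own statement) =====
-- stated objective: simpler
-- what changed: B drops A's inner range(min(3,len(words)),0,-1) multi-word prefix scan (dead because no known dispatch name contains a space) and instead does one flat pass that tests only the first whitespace token of each comma segment; it also drops the redundant segment.strip()/candidate.strip() calls.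
import Mathlib
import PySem

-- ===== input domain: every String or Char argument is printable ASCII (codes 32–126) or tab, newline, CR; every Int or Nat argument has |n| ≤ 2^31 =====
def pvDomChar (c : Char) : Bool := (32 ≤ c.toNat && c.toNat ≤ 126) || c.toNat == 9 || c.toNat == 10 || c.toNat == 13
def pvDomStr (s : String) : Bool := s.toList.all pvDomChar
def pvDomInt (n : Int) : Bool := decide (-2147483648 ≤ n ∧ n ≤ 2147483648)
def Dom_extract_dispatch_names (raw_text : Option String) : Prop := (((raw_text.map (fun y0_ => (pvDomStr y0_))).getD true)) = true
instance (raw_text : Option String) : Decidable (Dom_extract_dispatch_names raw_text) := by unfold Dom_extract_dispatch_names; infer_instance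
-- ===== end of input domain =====

-- B removes A's inner multi-word prefix scan (dead: no known dispatch name contains a space)
-- and instead tests only the first whitespace token of each comma segment — simpler, one flat pass.

-- ===== PORT A =====
-- the module-level set KNOWN_DISPATCH_NAMES (used for membership only)
def pvKnown : PySem.Set String := PySem.Set.ofList
  [ "adversarial-reviewer", "api-designer", "api-security-audit", "architect-review", "architect-reviewer",
    "blueprint-mode", "competitive-analyst", "content-marketer", "data-engineer",
    "debugger", "git-flow-manager", "implementation-plan", "llm-architect",
    "mcp-developer", "mcp-registry-navigator", "mcp-server-architect", "n8n-reviewer",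
    "nosql-specialist", "pm-orchestrator", "postgres-pro", "powershell-7-expert",
    "prompt-engineer", "query-clarifier", "report-generator", "research-analyst",
    "research-coordinator", "research-orchestrator", "research-synthesizer",
    "technical-researcher", "vault-keeper", "workflow-orchestrator",
    "process-qa", "process-analysis", "process-build", "process-planning",
    "process-research", "process-pentest", "pm", "task-classifier", "verify",
    "ensemble", "architect-loop", "save", "maintain", "index" ]

-- hand port of str.rstrip(chars) (PySem has no rstrip-with-chars form): exact — it drops
-- exactly the trailing characters that occur in `chars`, as CPython does
def pvRstripChars (cs : List Char) (chars : List Char) : List Char :=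
  ((cs.reverse).dropWhile (fun c => chars.contains c)).reverse

-- candidate = " ".join(words[:i]).strip().lower().rstrip(".,;:")
def pvCandidate (words : List (List Char)) (i : Nat) : List Char :=
  pvRstripChars (PySem.Chars.lower (PySem.Chars.strip (PySem.Chars.join [' '] (words.take i)))) ".,;:".toList

-- A's inner 'for i in range(min(3, len(words)), 0, -1): … break' loop (i counts down to 1)
def pvInnerA (words : List (List Char)) (i : Nat) (found : List String) : List String :=
  match i with
  | 0 => found
  | i' + 1 =>
    let candidate := pvCandidate words (i' + 1)
    if pvKnown.contains (String.ofList candidate) then found ++ [String.ofList candidate]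
    else pvInnerA words i' found

def extract_dispatch_names (raw_text : Option String) : List String :=
  match raw_text with
  | none => []
  | some s =>
    if s.toList = [] then []        -- `if not raw_text`: the falsy string is ""
    else
      let raw_lower := PySem.Chars.strip (PySem.Chars.lower s.toList)
      if PySem.Chars.startswith raw_lower "none".toList || PySem.Chars.startswith raw_lower "n/a".toList then []
      else
        (PySem.Chars.splitOn s.toList [',']).foldl
          (fun found segment =>
            let seg := PySem.Chars.strip segment
            let words := PySem.Chars.split₀ seg
            pvInnerA words (min 3 words.length) found) []

-- ===== PORT B =====
def extract_dispatch_names_alt (raw_text : Option String) : List String :=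
  match raw_text with
  | none => []
  | some s =>
    if s.toList = [] then []
    else
      let raw_lower := PySem.Chars.strip (PySem.Chars.lower s.toList)
      if PySem.Chars.startswith raw_lower "none".toList || PySem.Chars.startswith raw_lower "n/a".toList then []
      else
        (PySem.Chars.splitOn s.toList [',']).foldl
          (fun found segment =>
            match PySem.Chars.split₀ segment with
            | [] => found
            | w :: _ =>
              let candidate := pvRstripChars (PySem.Chars.lower w) ".,;:".toList
              if pvKnown.contains (String.ofList candidate) then found ++ [String.ofList candidate]
              else found) []

-- ===== PRECONDITION & SPEC =====
def Spec_extract_dispatch_names (raw_text : Option String) (out : List String) : Prop := out = extract_dispatch_names_alt raw_text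
instance (raw_text : Option String) (out : List String) : Decidable (Spec_extract_dispatch_names raw_text out) := by unfold Spec_extract_dispatch_names; infer_instance

-- ===== CLAIM (what is proved, stated in full; the proofs are below) =====
def Claim_equal_extract_dispatch_names : Prop := ∀ (raw_text : Option String), Dom_extract_dispatch_names raw_text → Spec_extract_dispatch_names raw_text (extract_dispatch_names raw_text)

-- ===== LEMMAS AND PROOFS =====

-- every token produced by split₀ is nonempty and whitespace-free
def pvGood (w : List Char) : Prop := w ≠ [] ∧ ∀ c ∈ w, PySem.Chars.isspace c = false

lemma pv_go_good (s : List Char) : ∀ (cur : List Char) (acc : List (List Char)),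
    (∀ c ∈ cur, PySem.Chars.isspace c = false) → (∀ w ∈ acc, pvGood w) →
    ∀ w ∈ PySem.Chars.split₀.go s cur acc, pvGood w := by
  induction s with
  | nil =>
    intro cur acc hcur hacc w hw
    rw [PySem.Chars.split₀.go] at hw
    split_ifs at hw with h
    · exact hacc w (List.mem_reverse.mp hw)
    · rcases List.mem_cons.mp (List.mem_reverse.mp hw) with rfl | h2
      · exact ⟨by simpa [List.isEmpty_iff] using h, fun c hc => hcur c (List.mem_reverse.mp hc)⟩
      · exact hacc w h2
  | cons c rest ih =>
    intro cur acc hcur hacc w hw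
    rw [PySem.Chars.split₀.go] at hw
    split_ifs at hw with hsp hemp
    · exact ih [] acc (by simp) hacc w hw
    · refine ih [] (cur.reverse :: acc) (by simp) ?_ w hw
      intro v hv
      rcases List.mem_cons.mp hv with rfl | h2
      · exact ⟨by simpa [List.isEmpty_iff] using hemp, fun d hd => hcur d (List.mem_reverse.mp hd)⟩
      · exact hacc v h2
    · refine ih (c :: cur) acc ?_ hacc w hw
      intro d hd
      rcases List.mem_cons.mp hd with rfl | h2
      · simpa using hsp
      · exact hcur d h2

lemma pv_split₀_good (s : List Char) : ∀ w ∈ PySem.Chars.split₀ s, pvGood w := by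
  intro w hw
  exact pv_go_good s [] [] (by simp) (by simp) w hw

-- split₀ ignores leading whitespace
lemma pv_go_lstrip (s : List Char) (acc : List (List Char)) :
    PySem.Chars.split₀.go (s.dropWhile PySem.Chars.isspace) [] acc = PySem.Chars.split₀.go s [] acc := by
  induction s generalizing acc with
  | nil => rfl
  | cons c rest ih =>
    by_cases h : PySem.Chars.isspace c = true
    · rw [List.dropWhile_cons_of_pos h, ih]
      conv_rhs => rw [PySem.Chars.split₀.go]
      simp [h]
    · rw [List.dropWhile_cons_of_neg h]

-- a run of whitespace only flushes the current word
lemma pv_go_spaces (t : List Char) (cur : List Char) (acc : List (List Char))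
    (ht : ∀ c ∈ t, PySem.Chars.isspace c = true) :
    PySem.Chars.split₀.go t cur acc = PySem.Chars.split₀.go [] cur acc := by
  induction t generalizing cur acc with
  | nil => rfl
  | cons c rest ih =>
    conv_lhs => rw [PySem.Chars.split₀.go]
    have hc : PySem.Chars.isspace c = true := ht c (by simp)
    rw [if_pos hc]
    by_cases hemp : cur.isEmpty = true
    · rw [if_pos hemp, ih _ _ (fun d hd => ht d (by simp [hd]))]
      rw [List.isEmpty_iff] at hemp; subst hemp; rfl
    · rw [if_neg hemp, ih _ _ (fun d hd => ht d (by simp [hd]))]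
      rw [PySem.Chars.split₀.go, PySem.Chars.split₀.go]
      simp [hemp]

-- split₀ ignores trailing whitespace
lemma pv_go_append_spaces (s t : List Char) (cur : List Char) (acc : List (List Char))
    (ht : ∀ c ∈ t, PySem.Chars.isspace c = true) :
    PySem.Chars.split₀.go (s ++ t) cur acc = PySem.Chars.split₀.go s cur acc := by
  induction s generalizing cur acc with
  | nil => simpa using pv_go_spaces t cur acc ht
  | cons c rest ih =>
    rw [List.cons_append, PySem.Chars.split₀.go]
    conv_rhs => rw [PySem.Chars.split₀.go]
    split_ifs <;> rw [ih]

-- segment.strip() before segment.split() is redundant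
lemma pv_split₀_strip (s : List Char) :
    PySem.Chars.split₀ (PySem.Chars.strip s) = PySem.Chars.split₀ s := by
  unfold PySem.Chars.split₀ PySem.Chars.strip
  set u := PySem.Chars.lstrip s with hu
  have hsplit : u = PySem.Chars.rstrip u ++ (u.reverse.takeWhile PySem.Chars.isspace).reverse := by
    unfold PySem.Chars.rstrip
    rw [← List.reverse_append, ← List.takeWhile_append_dropWhile (p := PySem.Chars.isspace) (l := u.reverse)]
    simp
  rw [show PySem.Chars.split₀.go s [] [] = PySem.Chars.split₀.go u [] [] from
      (by rw [hu]; exact (pv_go_lstrip s []).symm ▸ rfl)]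
  conv_rhs => rw [hsplit]
  rw [pv_go_append_spaces]
  intro c hc
  exact List.mem_takeWhile_imp (List.mem_reverse.mp hc)

-- membership of a non-dropped char survives dropWhile
lemma pv_mem_dropWhile {p : Char → Bool} {c : Char} {l : List Char} (hc : c ∈ l) (hp : p c = false) :
    c ∈ l.dropWhile p := by
  induction l with
  | nil => cases hc
  | cons a t ih =>
    by_cases ha : p a = true
    · rw [List.dropWhile_cons_of_pos ha]
      rcases List.mem_cons.mp hc with rfl | h
      · rw [ha] at hp; cases hp
      · exact ih h
    · simpa [List.dropWhile_cons_of_neg (by simpa using ha)] using hc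

-- no known dispatch name contains a space
set_option maxRecDepth 10000 in
lemma pv_known_no_space (x : String) (hx : pvKnown.contains x = true) : ¬ ' ' ∈ x.toList := by
  have hmem : x ∈ (pvKnown : List String) := by
    simpa [PySem.Set.contains, List.contains_iff_mem] using hx
  have hall : ∀ w ∈ (pvKnown : List String), ¬ ' ' ∈ w.toList := by decide
  exact hall x hmem

lemma pv_join_cons₂ (w w2 : List Char) (l : List (List Char)) :
    PySem.Chars.join [' '] (w :: w2 :: l) = w ++ ' ' :: PySem.Chars.join [' '] (w2 :: l) := by
  simp [PySem.Chars.join, List.intercalate]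

lemma pv_join_singleton (w : List Char) : PySem.Chars.join [' '] [w] = w := by
  simp [PySem.Chars.join, List.intercalate]

-- a join of good tokens ends in a non-whitespace char
lemma pv_join_rev (ws : List (List Char)) (hne : ws ≠ []) (hgood : ∀ w ∈ ws, pvGood w) :
    ∃ c t, (PySem.Chars.join [' '] ws).reverse = c :: t ∧ PySem.Chars.isspace c = false := by
  induction ws with
  | nil => cases hne rfl
  | cons w rest ih =>
    cases rest with
    | nil =>
      rw [pv_join_singleton]
      obtain ⟨hw, hs⟩ := hgood w (by simp)
      obtain ⟨c, t, hct⟩ := List.exists_cons_of_ne_nil (by simpa using hw : w.reverse ≠ [])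
      exact ⟨c, t, hct, hs c (List.mem_reverse.mp (hct ▸ List.mem_cons_self ..))⟩
    | cons w2 rest' =>
      obtain ⟨c, t, hct, hc⟩ := ih (by simp) (fun v hv => hgood v (by simp [hv]))
      refine ⟨c, t ++ [' '] ++ w.reverse, ?_, hc⟩
      rw [pv_join_cons₂]
      simp [hct]

-- the .strip() in A's candidate normalisation is the identity on a join of good tokens
lemma pv_strip_join (ws : List (List Char)) (hne : ws ≠ []) (hgood : ∀ w ∈ ws, pvGood w) :
    PySem.Chars.strip (PySem.Chars.join [' '] ws) = PySem.Chars.join [' '] ws := by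
  have hhead : ∃ c t, PySem.Chars.join [' '] ws = c :: t ∧ PySem.Chars.isspace c = false := by
    obtain ⟨w, rest, rfl⟩ := List.exists_cons_of_ne_nil hne
    obtain ⟨hw, hs⟩ := hgood w (by simp)
    obtain ⟨c, t, hct⟩ := List.exists_cons_of_ne_nil hw
    have hc : PySem.Chars.isspace c = false := hs c (hct ▸ List.mem_cons_self ..)
    cases rest with
    | nil => exact ⟨c, t, by rw [pv_join_singleton, hct], hc⟩
    | cons w2 rest' => exact ⟨c, t ++ ' ' :: PySem.Chars.join [' '] (w2 :: rest'), by rw [pv_join_cons₂, hct]; rfl, hc⟩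
  obtain ⟨c, t, hct, hc⟩ := hhead
  obtain ⟨c', t', hct', hc'⟩ := pv_join_rev ws hne hgood
  unfold PySem.Chars.strip PySem.Chars.lstrip PySem.Chars.rstrip
  rw [hct, List.dropWhile_cons_of_neg (by simp [hc]), ← hct, hct', List.dropWhile_cons_of_neg (by simp [hc']), ← hct']
  simp

lemma pv_space_mem_rstrip {cs : List Char} (h : ' ' ∈ cs) : ' ' ∈ pvRstripChars cs ".,;:".toList := by
  unfold pvRstripChars
  exact List.mem_reverse.mpr (pv_mem_dropWhile (List.mem_reverse.mpr h) (by decide))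

-- a multi-word candidate keeps its separating space through strip/lower/rstrip
lemma pv_candidate_space (words : List (List Char)) (i : Nat)
    (hgood : ∀ w ∈ words, pvGood w) (h2 : 2 ≤ i) (hlen : 2 ≤ words.length) :
    ' ' ∈ pvCandidate words i := by
  unfold pvCandidate
  obtain ⟨w, rest, rfl⟩ := List.exists_cons_of_ne_nil (by rintro rfl; simp at hlen : words ≠ [])
  obtain ⟨w2, rest', rfl⟩ := List.exists_cons_of_ne_nil (by rintro rfl; simp at hlen : rest ≠ [])
  obtain ⟨j, rfl⟩ : ∃ j, i = j + 2 := ⟨i - 2, by omega⟩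
  have htake : (w :: w2 :: rest').take (j + 2) = w :: w2 :: rest'.take j := by simp
  rw [htake]
  have hgood' : ∀ v ∈ w :: w2 :: rest'.take j, pvGood v := by
    intro v hv
    rcases List.mem_cons.mp hv with rfl | hv'
    · exact hgood v (by simp)
    rcases List.mem_cons.mp hv' with rfl | hv''
    · exact hgood v (by simp)
    · exact hgood v (by simp [List.mem_of_mem_take hv''])
  rw [pv_strip_join _ (by simp) hgood']
  apply pv_space_mem_rstrip
  have : ' ' ∈ PySem.Chars.join [' '] (w :: w2 :: rest'.take j) := by
    rw [pv_join_cons₂]; simp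
  simpa [PySem.Chars.lower, List.mem_map] using ⟨' ', this, by decide⟩

-- the single-word candidate is B's candidate
lemma pv_candidate_one (w : List Char) (rest : List (List Char)) (hgood : pvGood w) :
    pvCandidate (w :: rest) 1 = pvRstripChars (PySem.Chars.lower w) ".,;:".toList := by
  unfold pvCandidate
  rw [show (w :: rest).take 1 = [w] by simp, pv_join_singleton,
      show PySem.Chars.strip w = w from by
        simpa [pv_join_singleton] using pv_strip_join [w] (by simp) (by simpa using hgood)]

-- on ≥ 2 tokens A's countdown falls through to i = 1: every longer candidate has a space
lemma pv_innerA_to_one (words : List (List Char)) (k : Nat) (found : List String)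
    (hgood : ∀ w ∈ words, pvGood w) (hlen : 2 ≤ words.length) :
    pvInnerA words (k + 1) found = pvInnerA words 1 found := by
  induction k with
  | zero => rfl
  | succ k ih =>
    have hsp : ' ' ∈ pvCandidate words (k + 2) := pv_candidate_space words (k + 2) hgood (by omega) hlen
    have hcon : pvKnown.contains (String.ofList (pvCandidate words (k + 2))) = false := by
      cases hB : pvKnown.contains (String.ofList (pvCandidate words (k + 2))) with
      | false => rfl
      | true => exact absurd (by simpa using hsp) (pv_known_no_space _ hB)
    show pvInnerA words (k + 1 + 1) found = _
    rw [pvInnerA]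
    simp only [hcon, Bool.false_eq_true, if_false]
    exact ih

-- per-segment: A's step equals B's step
lemma pv_step_eq (found : List String) (seg : List Char) :
    (let s' := PySem.Chars.strip seg
     let words := PySem.Chars.split₀ s'
     pvInnerA words (min 3 words.length) found) =
    (match PySem.Chars.split₀ seg with
     | [] => found
     | w :: _ =>
       let candidate := pvRstripChars (PySem.Chars.lower w) ".,;:".toList
       if pvKnown.contains (String.ofList candidate) then found ++ [String.ofList candidate]
       else found) := by
  simp only [pv_split₀_strip]
  rcases h : PySem.Chars.split₀ seg with _ | ⟨w, rest⟩
  · rfl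
  · have hgood : ∀ v ∈ w :: rest, pvGood v := fun v hv => pv_split₀_good seg v (h ▸ hv)
    have hw : pvGood w := hgood w (by simp)
    cases rest with
    | nil =>
      show pvInnerA [w] 1 found = _
      rw [pvInnerA]
      simp only [pv_candidate_one w [] hw, pvInnerA]
    | cons w2 rest' =>
      have hmin : min 3 (w :: w2 :: rest').length = (min 3 (w :: w2 :: rest').length - 1) + 1 := by
        simp only [List.length_cons]; omega
      rw [hmin, pv_innerA_to_one _ _ _ hgood (by simp), pvInnerA]
      simp only [pv_candidate_one w (w2 :: rest') hw, pvInnerA]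

-- ===== VERDICT (by name: the statement is the Claim_ definition above) =====
theorem extract_dispatch_names_spec : Claim_equal_extract_dispatch_names := by
  intro raw_text _
  unfold Spec_extract_dispatch_names
  cases raw_text with
  | none => rfl
  | some s =>
    show extract_dispatch_names (some s) = extract_dispatch_names_alt (some s)
    simp only [extract_dispatch_names, extract_dispatch_names_alt]
    by_cases h1 : s.toList = []
    · simp [h1]
    rw [if_neg h1, if_neg h1]
    by_cases h2 : (PySem.Chars.startswith (PySem.Chars.strip (PySem.Chars.lower s.toList)) "none".toList
        || PySem.Chars.startswith (PySem.Chars.strip (PySem.Chars.lower s.toList)) "n/a".toList) = true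
    · rw [if_pos h2, if_pos h2]
    · rw [if_neg h2, if_neg h2]
      exact List.foldl_ext _ _ [] (fun a x _ => pv_step_eq a x)
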